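-- pv_equiv track=rewrite | github.com/gourav-sharma1857/cipher-spry-backend | patterns.py | consonant_double_vowel_single_shift
-- ===== SOURCE A (Python) =====
-- MOD_26 = 26 # Constant for modulo 26, used for wrapping around the alphabet (A-Z)
--
-- ASCII_A_UPPER = ord('A') # ASCII value of 'A' (65), used as a base for character-to-index conversion
--
-- VOWELS = "AEIOU" # String of uppercase vowels
--
-- def is_vowel(char: str) -> bool: # Function to check if a character is a vowel
--     return char.upper() in VOWELS # Convert char to uppercase and check if it's in the VOWELS string
--
-- def is_consonant(char: str) -> bool: # Function to check if a character is a consonant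
--     return char.isalpha() and not is_vowel(char) # Check if it's an alphabet character AND not a vowel
--
-- def shift_char(char: str, shift: int) -> str: # Function to shift a character by a given amount (Caesar cipher style)
--     if 'A' <= char <= 'Z': # Check if the character is an uppercase letter
--         # Convert char to 0-25 index, add shift, apply modulo 26, handle negative results, convert back to ASCII char
--         return chr(((ord(char) - ASCII_A_UPPER + shift) % MOD_26 + MOD_26) % MOD_26 + ASCII_A_UPPER)
--     return char # Return non-alphabetic characters unchanged
--
-- def consonant_double_vowel_single_shift(word: str) -> str: # Pattern: consonants shift by 2, vowels by 1
--     transformed = [] # Initialize an empty list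
--     for char in word: # Iterate through each character
--         if is_consonant(char): # If it's a consonant
--             transformed.append(shift_char(char, 2)) # Shift by 2
--         elif is_vowel(char): # If it's a vowel
--             transformed.append(shift_char(char, 1)) # Shift by 1
--         else: # If not a letter, append unchanged
--             transformed.append(char)
--     return "".join(transformed) # Join the list of characters
-- ===== SOURCE B (Python) =====
-- # B: precompute a 26-entry translation table once and use str.translate,
-- # instead of classifying and shifting each character on every call.
-- _TABLE = str.maketrans({
--     c: chr((ord(c) - 65 + (1 if c in "AEIOU" else 2)) % 26 + 65)
--     for c in map(chr, range(65, 91))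
-- })
--
-- def consonant_double_vowel_single_shift(word: str) -> str:
--     return word.translate(_TABLE)
-- ===== Notes on version B (the rewrite author's own statement) =====
-- stated objective: faster
-- what changed: Replaces the per-character classify-and-shift loop (is_consonant/is_vowel tests plus modular shift_char on every character of every call) with a 26-entry translation table precomputed once at module load and applied via str.translate; lowercase and non-letters pass through because the table only maps uppercase letters, matching A.
import Mathlib
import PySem

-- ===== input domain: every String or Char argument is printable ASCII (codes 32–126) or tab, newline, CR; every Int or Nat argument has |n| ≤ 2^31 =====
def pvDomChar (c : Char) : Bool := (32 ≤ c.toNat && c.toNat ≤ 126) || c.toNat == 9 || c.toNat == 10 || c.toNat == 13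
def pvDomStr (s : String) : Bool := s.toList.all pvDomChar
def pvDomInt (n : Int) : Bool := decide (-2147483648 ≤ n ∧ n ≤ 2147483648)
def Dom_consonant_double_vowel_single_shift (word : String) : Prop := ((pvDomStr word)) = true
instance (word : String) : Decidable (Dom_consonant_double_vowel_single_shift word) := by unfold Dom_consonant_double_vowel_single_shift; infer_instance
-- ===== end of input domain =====

-- B replaces A's per-character classify-and-shift with a precomputed 26-entry
-- uppercase translation table applied by lookup (idiomatic str.translate style).

-- ===== PORT A =====
def pvVowels : List Char := "AEIOU".toList

def pv_is_vowel (c : Char) : Bool := PySem.Chars.isIn [PySem.Chars.upperChar c] pvVowels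

def pv_is_consonant (c : Char) : Bool := PySem.Chars.isalpha c && !(pv_is_vowel c)

def pv_shift_char (c : Char) (shift : Int) : Char :=
  if 'A' ≤ c ∧ c ≤ 'Z' then
    Char.ofNat ((PySem.Int.mod (PySem.Int.mod ((c.toNat : Int) - 65 + shift) 26 + 26) 26 + 65).toNat)
  else c

def consonant_double_vowel_single_shift (word : String) : String :=
  String.mk (word.toList.foldl (fun acc c =>
    if pv_is_consonant c then acc ++ [pv_shift_char c 2]
    else if pv_is_vowel c then acc ++ [pv_shift_char c 1]
    else acc ++ [c]) [])

-- ===== PORT B =====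
-- the dict comprehension over range(65, 91) building the translation table
def pvTable : PySem.Dict Char Char :=
  (PySem.List.pyRange 65 91 1).foldl (fun d n =>
    d.insert (Char.ofNat n.toNat)
      (Char.ofNat ((PySem.Int.mod (n - 65 + (if PySem.Chars.isIn [Char.ofNat n.toNat] pvVowels then 1 else 2)) 26 + 65).toNat))) (PySem.Dict.empty)

def consonant_double_vowel_single_shift_alt (word : String) : String :=
  String.mk (word.toList.map (fun c => (PySem.Dict.get? pvTable c).getD c))

-- ===== PRECONDITION & SPEC =====
def Spec_consonant_double_vowel_single_shift (word : String) (out : String) : Prop := out = consonant_double_vowel_single_shift_alt word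
instance (word : String) (out : String) : Decidable (Spec_consonant_double_vowel_single_shift word out) := by unfold Spec_consonant_double_vowel_single_shift; infer_instance

-- ===== CLAIM (what is proved, stated in full; the proofs are below) =====
def Claim_equal_consonant_double_vowel_single_shift : Prop := ∀ (word : String), Dom_consonant_double_vowel_single_shift word → Spec_consonant_double_vowel_single_shift word (consonant_double_vowel_single_shift word)

-- ===== LEMMAS AND PROOFS =====

-- A's per-character transformation, named for the proofs
def pvStepA (c : Char) : Char :=
  if pv_is_consonant c then pv_shift_char c 2
  else if pv_is_vowel c then pv_shift_char c 1
  else c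

lemma pvFoldA (l : List Char) (acc : List Char) :
    l.foldl (fun acc c =>
      if pv_is_consonant c then acc ++ [pv_shift_char c 2]
      else if pv_is_vowel c then acc ++ [pv_shift_char c 1]
      else acc ++ [c]) acc = acc ++ l.map pvStepA := by
  induction l generalizing acc with
  | nil => simp
  | cons c t ih =>
    simp only [List.foldl, List.map]
    rw [ih]
    unfold pvStepA
    split_ifs <;> simp

-- per-character agreement, checked exhaustively over the ASCII range
set_option maxRecDepth 4000 in
lemma pvStep_eq_fin : ∀ n : Fin 128,
    pvStepA (Char.ofNat n.val) = (PySem.Dict.get? pvTable (Char.ofNat n.val)).getD (Char.ofNat n.val) := by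
  decide

lemma pvStep_eq (c : Char) (h : pvDomChar c = true) :
    pvStepA c = (PySem.Dict.get? pvTable c).getD c := by
  have hlt : c.toNat < 128 := by
    simp [pvDomChar] at h
    omega
  have := pvStep_eq_fin ⟨c.toNat, hlt⟩
  simpa [Char.ofNat_toNat] using this

-- ===== VERDICT (by name: the statement is the Claim_ definition above) =====
theorem consonant_double_vowel_single_shift_spec : Claim_equal_consonant_double_vowel_single_shift := by
  intro word hdom
  unfold Spec_consonant_double_vowel_single_shift
  unfold consonant_double_vowel_single_shift consonant_double_vowel_single_shift_alt
  rw [pvFoldA]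
  simp only [List.nil_append]
  congr 1
  apply List.map_congr_left
  intro c hc
  apply pvStep_eq
  exact List.all_eq_true.mp hdom c hc
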